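-- pv_equiv track=rewrite | github.com/zeynepyorulmaz/COMP-100-IntroProgramming-Python | comp100-2023s-ps2-zeynepyorulmaz-main/part2_b.py | get_the_solution_C1
-- ===== SOURCE A (Python) =====
-- def get_the_solution_C1(num_of_chars, num_of_subgroups, num_seats_in_a_slot, seat_config):
--     seats_per_subgroup = num_of_chars // num_of_subgroups
--     slots = seat_config.split('|')
--     last_seat_config = ""
--     reserved_seats = 0
--     for slot in slots:
--
--         empty_seats = 0
--         for i in range(len(slot)):
--             if slot[i] == "O":
--                 empty_seats += 1
--         solution = slot
--         while empty_seats >= seats_per_subgroup: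
--             solution = solution.replace("O", "S", seats_per_subgroup)
--             empty_seats = 0
--
--             for i in range(len(solution)):
--                 if solution[i] == "O":
--                     empty_seats += 1
--
--
--         last_seat_config = last_seat_config + solution + "|"
--     last_seat_config = last_seat_config[:len(last_seat_config)-1:]
--     for i in range(len(last_seat_config)):
--         if last_seat_config[i] == "S":
--             reserved_seats += 1
--
--     if reserved_seats == num_of_chars:
--         return last_seat_config
--     else:
--         return "X"
-- ===== SOURCE B (Python) =====
-- def get_the_solution_C1(num_of_chars, num_of_subgroups, num_seats_in_a_slot, seat_config):
--     k = num_of_chars // num_of_subgroups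
--     out_slots = []
--     reserved = 0
--     for slot in seat_config.split('|'):
--         to_convert = (slot.count('O') // k) * k
--         chars = []
--         for c in slot:
--             if c == 'O' and to_convert > 0:
--                 chars.append('S')
--                 to_convert -= 1
--                 reserved += 1
--             else:
--                 if c == 'S':
--                     reserved += 1
--                 chars.append(c)
--         out_slots.append(''.join(chars))
--     result = '|'.join(out_slots)
--     return result if reserved == num_of_chars else "X"
-- ===== Notes on version B (the rewrite author's own statement) =====
-- stated objective: alternative
-- what changed: A repeatedly calls replace('O','S',k) and recounts the remaining O's in a while-loop per slot and counts 'S' in a final pass; B counts O's once per slot and converts the leftmost floor(count/k)*k of them to 'S' in a single pass, accumulating the reserved-seat count on the fly.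
import Mathlib
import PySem

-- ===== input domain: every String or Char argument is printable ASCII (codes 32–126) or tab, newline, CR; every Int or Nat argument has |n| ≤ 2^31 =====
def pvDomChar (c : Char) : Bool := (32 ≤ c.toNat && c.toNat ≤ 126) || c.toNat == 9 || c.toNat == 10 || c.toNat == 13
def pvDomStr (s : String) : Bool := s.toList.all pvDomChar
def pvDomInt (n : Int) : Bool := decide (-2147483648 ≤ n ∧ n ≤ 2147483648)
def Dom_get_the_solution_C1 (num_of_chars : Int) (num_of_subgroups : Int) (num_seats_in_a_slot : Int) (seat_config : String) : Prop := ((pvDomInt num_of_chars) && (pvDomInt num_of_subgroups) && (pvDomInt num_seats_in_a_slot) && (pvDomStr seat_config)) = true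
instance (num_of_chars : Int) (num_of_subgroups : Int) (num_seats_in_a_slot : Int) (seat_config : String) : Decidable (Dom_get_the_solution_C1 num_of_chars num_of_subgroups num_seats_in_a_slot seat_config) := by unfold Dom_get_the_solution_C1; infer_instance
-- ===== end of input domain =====

-- B replaces A's repeated replace-and-recount while-loop by one O-count per slot and a single
-- conversion pass (objective: alternative single-pass algorithm; equal return values on all of Pre_).

-- ===== PORT A =====

-- "for i in range(len(s)): if s[i] == 'O': empty += 1" (indexing enumerates exactly the chars)
def pvCountO (cs : List Char) : Int :=
  cs.foldl (fun acc c => if c == 'O' then acc + 1 else acc) 0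

def pvCountS (cs : List Char) : Int :=
  cs.foldl (fun acc c => if c == 'S' then acc + 1 else acc) 0

-- hand port of s.replace("O", "S", n): exact for the 1-char pattern "O" for every int n
-- (n = 0 replaces nothing; n < 0 never reaches 0, so it replaces all, as Python does)
def pvReplaceO : List Char → Int → List Char
  | [], _ => []
  | c :: rest, n => if c = 'O' ∧ n ≠ 0 then 'S' :: pvReplaceO rest (n - 1) else c :: pvReplaceO rest n

-- the while-loop; fuel makes it total (Python diverges when seats_per_subgroup ≤ 0, outside Pre_;
-- inside Pre_ the count strictly decreases, so fuel = len(slot)+1 is never exhausted)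
def pvWhile (k : Int) : Nat → List Char → Int → List Char
  | 0, solution, _ => solution
  | fuel + 1, solution, empty =>
      if k ≤ empty then
        let sol' := pvReplaceO solution k
        pvWhile k fuel sol' (pvCountO sol')
      else solution

def get_the_solution_C1 (num_of_chars : Int) (num_of_subgroups : Int) (num_seats_in_a_slot : Int) (seat_config : String) : String :=
  let seats_per_subgroup := PySem.Int.floordiv num_of_chars num_of_subgroups
  let slots := PySem.Chars.splitOn seat_config.toList ['|']
  let last := slots.foldl
    (fun acc slot =>
      let empty := pvCountO slot
      let solution := pvWhile seats_per_subgroup (slot.length + 1) slot empty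
      acc ++ solution ++ ['|']) []
  let last := PySem.List.slice last none (some ((last.length : Int) - 1))
  let reserved := pvCountS last
  if reserved = num_of_chars then String.mk last else "X"

-- ===== PORT B =====

-- Source B's inner for-loop: builds the slot's output while counting reserved seats;
-- returns (chars, reserved) (to_convert is threaded through)
def pvBSlot : List Char → Int → Int → List Char × Int
  | [], _, reserved => ([], reserved)
  | c :: rest, t, reserved =>
      if c = 'O' ∧ 0 < t then
        let (out, r) := pvBSlot rest (t - 1) (reserved + 1)
        ('S' :: out, r)
      else
        let (out, r) := pvBSlot rest t (if c = 'S' then reserved + 1 else reserved)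
        (c :: out, r)

def get_the_solution_C1_alt (num_of_chars : Int) (num_of_subgroups : Int) (num_seats_in_a_slot : Int) (seat_config : String) : String :=
  let k := PySem.Int.floordiv num_of_chars num_of_subgroups
  let st := (PySem.Chars.splitOn seat_config.toList ['|']).foldl
    (fun (st : List (List Char) × Int) slot =>
      let (out, r) := pvBSlot slot (PySem.Int.floordiv (slot.count 'O' : Int) k * k) st.2
      (st.1 ++ [out], r)) ([], 0)
  let result := PySem.Chars.join ['|'] st.1
  if st.2 = num_of_chars then String.mk result else "X"

-- ===== PRECONDITION & SPEC =====
-- Pre_ excludes num_of_subgroups = 0, where Python A raises ZeroDivisionError, and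
-- num_of_chars // num_of_subgroups ≤ 0, where A's while-loop never terminates.
def Pre_get_the_solution_C1 (num_of_chars : Int) (num_of_subgroups : Int) (num_seats_in_a_slot : Int) (seat_config : String) : Prop :=
  num_of_subgroups ≠ 0 ∧ 1 ≤ PySem.Int.floordiv num_of_chars num_of_subgroups
instance (num_of_chars : Int) (num_of_subgroups : Int) (num_seats_in_a_slot : Int) (seat_config : String) : Decidable (Pre_get_the_solution_C1 num_of_chars num_of_subgroups num_seats_in_a_slot seat_config) := by unfold Pre_get_the_solution_C1; infer_instance

def pvWitness_get_the_solution_C1 : Int × Int × Int × String := (4, 2, 4, "OOXO|SOO")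

def Spec_get_the_solution_C1 (num_of_chars : Int) (num_of_subgroups : Int) (num_seats_in_a_slot : Int) (seat_config : String) (out : String) : Prop := out = get_the_solution_C1_alt num_of_chars num_of_subgroups num_seats_in_a_slot seat_config
instance (num_of_chars : Int) (num_of_subgroups : Int) (num_seats_in_a_slot : Int) (seat_config : String) (out : String) : Decidable (Spec_get_the_solution_C1 num_of_chars num_of_subgroups num_seats_in_a_slot seat_config out) := by unfold Spec_get_the_solution_C1; infer_instance

-- ===== CLAIM (what is proved, stated in full; the proofs are below) =====
def Claim_equal_get_the_solution_C1 : Prop := ∀ (num_of_chars : Int) (num_of_subgroups : Int) (num_seats_in_a_slot : Int) (seat_config : String), Dom_get_the_solution_C1 num_of_chars num_of_subgroups num_seats_in_a_slot seat_config → Pre_get_the_solution_C1 num_of_chars num_of_subgroups num_seats_in_a_slot seat_config → Spec_get_the_solution_C1 num_of_chars num_of_subgroups num_seats_in_a_slot seat_config (get_the_solution_C1 num_of_chars num_of_subgroups num_seats_in_a_slot seat_config)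

-- ===== LEMMAS AND PROOFS =====

theorem pvCountO_eq_count (cs : List Char) : pvCountO cs = (cs.count 'O' : Int) := by
  unfold pvCountO; simpa using PySem.List.foldl_beq_add_one cs 'O' 0

theorem pvCountS_eq_count (cs : List Char) : pvCountS cs = (cs.count 'S' : Int) := by
  unfold pvCountS; simpa using PySem.List.foldl_beq_add_one cs 'S' 0

theorem pvReplaceO_zero (cs : List Char) : pvReplaceO cs 0 = cs := by
  induction cs with
  | nil => rfl
  | cons c rest ih => simp [pvReplaceO, ih]

theorem pvReplaceO_comp (cs : List Char) (a b : Int) (ha : 0 ≤ a) (hb : 0 ≤ b) :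
    pvReplaceO (pvReplaceO cs a) b = pvReplaceO cs (a + b) := by
  induction cs generalizing a with
  | nil => rfl
  | cons c rest ih =>
    by_cases hc : c = 'O'
    · by_cases h0 : a = 0
      · subst h0; simp [pvReplaceO_zero]
      · have : c = 'O' ∧ a ≠ 0 := ⟨hc, h0⟩
        have hab : a + b ≠ 0 := by omega
        simp only [pvReplaceO, if_pos this]
        have : ¬ ('S' = 'O' ∧ b ≠ 0) := by simp
        simp only [pvReplaceO, if_neg this, if_pos (show c = 'O' ∧ a + b ≠ 0 from ⟨hc, hab⟩)]
        rw [ih (a - 1) (by omega)]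
        ring_nf
    · simp only [pvReplaceO, if_neg (by tauto : ¬ (c = 'O' ∧ a ≠ 0)),
        if_neg (by tauto : ¬ (c = 'O' ∧ a + b ≠ 0))]
      by_cases hb0 : c = 'O' ∧ b ≠ 0
      · exact absurd hb0.1 hc
      · simp only [pvReplaceO, if_neg hb0, ih a ha]

theorem count_pvReplaceO (cs : List Char) (n : Int) (hn : 0 ≤ n)
    (h : n.toNat ≤ cs.count 'O') :
    ((pvReplaceO cs n).count 'O' : Int) = cs.count 'O' - n := by
  induction cs generalizing n with
  | nil => simp at h ⊢; omega
  | cons c rest ih =>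
    by_cases hc : c = 'O'
    · subst hc
      by_cases h0 : n = 0
      · subst h0; rw [pvReplaceO_zero]; simp
      · have hrw : pvReplaceO ('O' :: rest) n = 'S' :: pvReplaceO rest (n - 1) := by
          simp [pvReplaceO, h0]
        rw [hrw]
        have := ih (n - 1) (by omega) (by simp [List.count_cons] at h ⊢; omega)
        simp only [List.count_cons] at this ⊢
        push_cast at this ⊢
        simp at this ⊢
        omega
    · simp only [pvReplaceO, if_neg (by tauto : ¬ (c = 'O' ∧ n ≠ 0))]
      have hcnt : (c :: rest).count 'O' = rest.count 'O' := by
        simp [List.count_cons, hc]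
      rw [hcnt] at h
      have := ih n hn h
      rw [List.count_cons]
      simp only [show (c == 'O') = false by simp [hc]]
      rw [hcnt]
      simpa using this

-- the while-loop replaces the first floor(empty/k)*k 'O's, provided enough fuel
theorem pvWhile_eq (k : Int) (hk : 1 ≤ k) : ∀ (fuel : Nat) (cs : List Char) (e : Int),
    e = (cs.count 'O' : Int) → e < fuel →
    pvWhile k fuel cs e = pvReplaceO cs (PySem.Int.floordiv e k * k) := by
  intro fuel
  induction fuel with
  | zero => intro cs e he hf; have : (0:Int) ≤ e := by rw [he]; positivity
            simp at hf; omega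
  | succ fuel ih =>
    intro cs e he hf
    rw [PySem.Int.floordiv_eq_ediv_of_pos (by omega)]
    by_cases hek : k ≤ e
    · have he0 : 0 ≤ e := by omega
      simp only [pvWhile, if_pos hek]
      have hcnt : (pvCountO (pvReplaceO cs k)) = e - k := by
        rw [pvCountO_eq_count, count_pvReplaceO cs k (by omega) (by omega)]
        omega
      have hcnt' : e - k = ((pvReplaceO cs k).count 'O' : Int) := by
        rw [count_pvReplaceO cs k (by omega) (by omega)]; omega
      rw [hcnt, ih (pvReplaceO cs k) (e - k) hcnt' (by omega),
        PySem.Int.floordiv_eq_ediv_of_pos (by omega),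
        pvReplaceO_comp cs k _ (by omega)
          (mul_nonneg (Int.ediv_nonneg (by omega) (by omega)) (by omega))]
      congr 1
      have hsplit : e = (e - k) + 1 * k := by ring
      rw [hsplit, Int.add_mul_ediv_right _ _ (by omega : k ≠ 0)]
      ring
    · simp only [pvWhile, if_neg hek]
      have : e / k = 0 := by
        apply Int.ediv_eq_zero_of_lt (by rw [he]; positivity) (by omega)
      rw [this]
      simp [pvReplaceO_zero]

-- spec-side per-slot result
def pvSol (k : Int) (slot : List Char) : List Char :=
  pvReplaceO slot (PySem.Int.floordiv (slot.count 'O' : Int) k * k)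

theorem pvBSlot_eq (cs : List Char) : ∀ (t r : Int), 0 ≤ t →
    pvBSlot cs t r = (pvReplaceO cs t, r + ((pvReplaceO cs t).count 'S' : Int)) := by
  induction cs with
  | nil => intro t r ht; simp [pvBSlot, pvReplaceO]
  | cons c rest ih =>
    intro t r ht
    by_cases h : c = 'O' ∧ 0 < t
    · have h' : c = 'O' ∧ t ≠ 0 := ⟨h.1, by omega⟩
      simp only [pvBSlot, if_pos h, pvReplaceO, if_pos h', ih (t-1) (r+1) (by omega)]
      simp [List.count_cons]
      push_cast
      ring
    · have h' : ¬ (c = 'O' ∧ t ≠ 0) := by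
        rintro ⟨hc, hn⟩; exact h ⟨hc, by omega⟩
      simp only [pvBSlot, if_neg h, pvReplaceO, if_neg h', ih t _ ht]
      by_cases hs : c = 'S'
      · simp [hs, List.count_cons]; push_cast; ring
      · simp [hs, List.count_cons]

-- B's fold over the slots
theorem pvBfold (k : Int) (hk : 1 ≤ k) (slots : List (List Char)) :
    ∀ (acc : List (List Char)) (r : Int),
    slots.foldl (fun (st : List (List Char) × Int) slot =>
      let (out, r) := pvBSlot slot (PySem.Int.floordiv (slot.count 'O' : Int) k * k) st.2
      (st.1 ++ [out], r)) (acc, r)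
    = (acc ++ slots.map (pvSol k),
       r + ((slots.map (pvSol k)).map (fun s => (s.count 'S' : Int))).sum) := by
  induction slots with
  | nil => intro acc r; simp
  | cons s rest ih =>
    intro acc r
    have ht : 0 ≤ PySem.Int.floordiv (s.count 'O' : Int) k * k := by
      rw [PySem.Int.floordiv_eq_ediv_of_pos (by omega)]
      positivity
    simp only [List.foldl_cons, pvBSlot_eq s _ r ht]
    rw [ih]
    simp [pvSol]
    omega

-- A's fold builds join ++ "|"
theorem pvAfold (f : List Char → List Char) (slots : List (List Char)) (hne : slots ≠ []) :
    ∀ (acc : List Char),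
    slots.foldl (fun acc slot => acc ++ f slot ++ ['|']) acc
    = acc ++ PySem.Chars.join ['|'] (slots.map f) ++ ['|'] := by
  induction slots with
  | nil => exact absurd rfl hne
  | cons s rest ih =>
    intro acc
    cases rest with
    | nil => simp [PySem.Chars.join_singleton]
    | cons s2 rest2 =>
      simp only [List.foldl_cons, ih (by simp)]
      simp [PySem.Chars.join_cons_cons]

-- 'S'-count distributes over the join (the separator contains no 'S')
theorem count_join (outs : List (List Char)) :
    ((PySem.Chars.join ['|'] outs).count 'S' : Int)
      = (outs.map (fun s => (s.count 'S' : Int))).sum := by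
  induction outs with
  | nil => simp [PySem.Chars.join]
  | cons s rest ih =>
    cases rest with
    | nil => simp [PySem.Chars.join_singleton]
    | cons s2 rest2 =>
      rw [PySem.Chars.join_cons_cons]
      simp only [List.count_append, List.map_cons, List.sum_cons]
      push_cast
      rw [ih]
      simp

theorem splitOn_go_ne_nil (sep : List Char) : ∀ (fuel : Nat) (l cur : List Char) (acc : List (List Char)),
    PySem.Chars.splitOn.go sep fuel l cur acc ≠ [] := by
  intro fuel
  induction fuel with
  | zero => intro l cur acc; simp [PySem.Chars.splitOn.go]
  | succ fuel ih =>
    intro l cur acc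
    cases l with
    | nil => simp [PySem.Chars.splitOn.go]
    | cons c rest =>
      rw [PySem.Chars.splitOn.go]
      split
      · exact ih _ _ _
      · exact ih _ _ _

theorem splitOn_ne_nil (s : List Char) : PySem.Chars.splitOn s ['|'] ≠ [] := by
  unfold PySem.Chars.splitOn
  exact splitOn_go_ne_nil _ _ _ _ _

-- ===== VERDICT (by name: the statement is the Claim_ definition above) =====
theorem get_the_solution_C1_spec : Claim_equal_get_the_solution_C1 := by
  intro nc ns nss cfg _ hpre
  obtain ⟨hns, hk⟩ := hpre
  unfold Spec_get_the_solution_C1 get_the_solution_C1 get_the_solution_C1_alt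
  set k := PySem.Int.floordiv nc ns with hkdef
  set slots := PySem.Chars.splitOn cfg.toList ['|'] with hslots
  have hne : slots ≠ [] := splitOn_ne_nil cfg.toList
  -- A's per-slot while-loop = pvSol
  have hstep : ∀ slot : List Char,
      pvWhile k (slot.length + 1) slot (pvCountO slot) = pvSol k slot := by
    intro slot
    rw [pvCountO_eq_count, pvWhile_eq k hk _ _ _ rfl
      (by push_cast; exact_mod_cast Nat.lt_succ_of_le (List.count_le_length)), pvSol]
  -- rewrite A's fold
  have hA : slots.foldl (fun acc slot =>
      acc ++ pvWhile k (slot.length + 1) slot (pvCountO slot) ++ ['|']) []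
      = PySem.Chars.join ['|'] (slots.map (pvSol k)) ++ ['|'] := by
    have := pvAfold (pvSol k) slots hne []
    simp only [List.nil_append] at this
    rw [← this]
    apply PySem.List.foldl_congr_mem
    intro acc slot _
    rw [hstep]
  simp only [hA, pvBfold k hk slots [] 0, List.nil_append, zero_add]
  set J := PySem.Chars.join ['|'] (slots.map (pvSol k)) with hJ
  have hslice : PySem.List.slice (J ++ ['|']) none (some ((((J ++ ['|']).length : Nat) : Int) - 1)) = J := by
    have h1 : ((((J ++ ['|']).length : Nat) : Int) - 1) = (J.length : Int) := by
      simp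
    rw [h1, PySem.List.slice_to _ (by positivity)]
    simp
  rw [hslice, pvCountS_eq_count, count_join]
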